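-- pv_equiv track=rewrite | github.com/ChirasthiT/DSGP-TravelMateAI | Em_Helper/scripts/risk_classification.py | assign_risk_level
-- ===== SOURCE A (Python) =====
-- def assign_risk_level(keywords):
--    high_risk_keywords = {"attack", "fire", "police", "help", "hospital", "danger"}
--    medium_risk_keywords = {"lost", "stuck", "alone", "scared", "thief"}
--
--    keyword_list = str(keywords).lower().split(" ")
--
--    if any(word in high_risk_keywords for word in keyword_list):
--        return "High"
--    elif any(word in medium_risk_keywords for word in keyword_list):
--        return "Medium"
--    else:
--        return "Low"
-- ===== SOURCE B (Python) =====
-- _SEVERITY = {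
--     "attack": 2, "fire": 2, "police": 2, "help": 2, "hospital": 2, "danger": 2,
--     "lost": 1, "stuck": 1, "alone": 1, "scared": 1, "thief": 1,
-- }
--
-- def assign_risk_level(keywords):
--     sev = 0
--     for word in str(keywords).lower().split(" "):
--         s = _SEVERITY.get(word, 0)
--         if s > sev:
--             sev = s
--             if sev == 2:
--                 break
--     return "High" if sev == 2 else "Medium" if sev == 1 else "Low"
-- ===== Notes on version B (the rewrite author's own statement) =====
-- stated objective: alternative
-- what changed: Replaced the two set-membership any-scans over the word list by a single severity dict (keyword -> 2/1) and one max-tracking pass with early break, mapping the final maximum back to High/Medium/Low.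
import Mathlib
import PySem

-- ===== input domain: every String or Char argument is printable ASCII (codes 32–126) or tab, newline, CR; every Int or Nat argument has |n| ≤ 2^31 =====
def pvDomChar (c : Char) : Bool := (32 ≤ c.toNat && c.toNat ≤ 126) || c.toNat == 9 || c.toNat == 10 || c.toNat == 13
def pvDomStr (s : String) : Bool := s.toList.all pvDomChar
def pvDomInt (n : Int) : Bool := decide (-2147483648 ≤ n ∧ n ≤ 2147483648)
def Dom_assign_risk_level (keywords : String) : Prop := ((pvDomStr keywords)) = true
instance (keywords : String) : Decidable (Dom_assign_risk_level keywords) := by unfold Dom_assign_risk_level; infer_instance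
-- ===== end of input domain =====

-- B replaces A's two set-membership any-scans by one severity dict and a single max-tracking pass with early break (alternative decomposition, same cost).

-- ===== PORT A =====
def assign_risk_level (keywords : String) : String :=
  let high_risk_keywords : PySem.Set String :=
    PySem.Set.ofList ["attack", "fire", "police", "help", "hospital", "danger"]
  let medium_risk_keywords : PySem.Set String :=
    PySem.Set.ofList ["lost", "stuck", "alone", "scared", "thief"]
  let keyword_list := (PySem.Str.split? (PySem.Str.lower keywords) " ").getD []
  if keyword_list.any (fun word => PySem.Set.contains high_risk_keywords word) then "High"
  else if keyword_list.any (fun word => PySem.Set.contains medium_risk_keywords word) then "Medium"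
  else "Low"

-- ===== PORT B =====
def sevDict : PySem.Dict String Int :=
  PySem.Dict.ofList
    [("attack", 2), ("fire", 2), ("police", 2), ("help", 2), ("hospital", 2), ("danger", 2),
     ("lost", 1), ("stuck", 1), ("alone", 1), ("scared", 1), ("thief", 1)]

-- the for-loop of Source B, with its early break when the maximum severity 2 is reached
def sevLoop : List String → Int → Int
  | [], sev => sev
  | word :: rest, sev =>
      let s := PySem.Dict.getD sevDict word 0
      if s > sev then (if s == 2 then s else sevLoop rest s) else sevLoop rest sev

def assign_risk_level_alt (keywords : String) : String :=
  let sev := sevLoop ((PySem.Str.split? (PySem.Str.lower keywords) " ").getD []) 0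
  if sev == 2 then "High" else if sev == 1 then "Medium" else "Low"

-- ===== PRECONDITION & SPEC =====
def Spec_assign_risk_level (keywords : String) (out : String) : Prop := out = assign_risk_level_alt keywords
instance (keywords : String) (out : String) : Decidable (Spec_assign_risk_level keywords out) := by unfold Spec_assign_risk_level; infer_instance

-- ===== CLAIM (what is proved, stated in full; the proofs are below) =====
def Claim_equal_assign_risk_level : Prop := ∀ (keywords : String), Dom_assign_risk_level keywords → Spec_assign_risk_level keywords (assign_risk_level keywords)

-- ===== LEMMAS AND PROOFS =====

def highSet : PySem.Set String :=
  PySem.Set.ofList ["attack", "fire", "police", "help", "hospital", "danger"]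
def medSet : PySem.Set String :=
  PySem.Set.ofList ["lost", "stuck", "alone", "scared", "thief"]

-- the severity dict agrees with A's two membership tests
set_option maxHeartbeats 1000000 in
lemma sev_lookup (w : String) :
    PySem.Dict.getD sevDict w 0 =
      if PySem.Set.contains highSet w then 2
      else if PySem.Set.contains medSet w then 1 else 0 := by
  have hd : sevDict =
      ((((((((((PySem.Dict.empty.insert "attack" (2:Int)).insert "fire" 2).insert "police" 2).insert "help" 2).insert "hospital" 2).insert "danger" 2).insert "lost" 1).insert "stuck" 1).insert "alone" 1).insert "scared" 1).insert "thief" 1 := by decide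
  have hh : highSet = ["attack", "fire", "police", "help", "hospital", "danger"] := by decide
  have hm : medSet = ["lost", "stuck", "alone", "scared", "thief"] := by decide
  rw [hd, hh, hm]
  simp only [PySem.Dict.getD_insert, PySem.Dict.getD_empty, PySem.Set.contains,
    List.contains_eq_mem, List.mem_cons, List.not_mem_nil, or_false, decide_eq_true_eq]
  split_ifs <;> try simp_all

-- the value A's if-chain classifies: 2 if a high-risk word occurs, else 1 if a medium-risk word occurs, else 0
def best (ws : List String) : Int :=
  if ws.any (fun w => PySem.Set.contains highSet w) then 2
  else if ws.any (fun w => PySem.Set.contains medSet w) then 1 else 0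

-- loop invariant: for a running maximum of 0 or 1, B's loop computes max sev (best ws)
lemma sevLoop_eq_best (ws : List String) (sev : Int) (h : sev = 0 ∨ sev = 1) :
    sevLoop ws sev = max sev (best ws) := by
  induction ws generalizing sev with
  | nil => rcases h with h | h <;> simp [sevLoop, best, h]
  | cons w rest ih =>
      simp only [sevLoop, sev_lookup w]
      rcases h with h | h <;> subst h <;>
      by_cases hh : w ∈ highSet <;> by_cases hm : w ∈ medSet <;>
      by_cases hA : ∃ x ∈ rest, x ∈ highSet <;> by_cases hM : ∃ x ∈ rest, x ∈ medSet <;>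
        norm_num [best, hh, hm, hA, hM, ih 1 (Or.inr rfl), ih 0 (Or.inl rfl)]

-- ===== VERDICT (by name: the statement is the Claim_ definition above) =====
theorem assign_risk_level_spec : Claim_equal_assign_risk_level := by
  intro keywords _
  unfold Spec_assign_risk_level assign_risk_level assign_risk_level_alt
  rw [sevLoop_eq_best _ 0 (Or.inl rfl)]
  rw [(rfl : (PySem.Set.ofList ["attack", "fire", "police", "help", "hospital", "danger"] : PySem.Set String) = highSet),
      (rfl : (PySem.Set.ofList ["lost", "stuck", "alone", "scared", "thief"] : PySem.Set String) = medSet)]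
  norm_num [best, highSet, medSet]
  split_ifs <;> first | rfl | omega
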